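-- pv_equiv track=rewrite | github.com/gezakov/neural_simulation | simulation.py | get_remaining_words_and_delimiters_after_prefix
-- ===== SOURCE A (Python) =====
-- def get_remaining_words_and_delimiters_after_prefix(prefix, words, delimiters):
--   if len(delimiters) == 0:
--     return [], []
--   if len(prefix) == 0:
--     return words[:], delimiters[:]
--   current_idx = len(delimiters[0])
--   for delimiter_idx,delimiter in list(enumerate(delimiters))[1:]:
--     word_idx = delimiter_idx - 1
--     word = words[word_idx]
--     current_idx += len(word)
--     if current_idx >= len(prefix):
--       remaining_words = words[word_idx + 1:]
--       if len(remaining_words) > 0: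
--         return words[word_idx + 1:], delimiters[delimiter_idx:]
--       else:
--         return [], []
--     else:
--       current_idx += len(delimiter)
--       if current_idx >= len(prefix):
--         remaining_words = words[word_idx + 1:]
--         if len(remaining_words) > 0:
--           return remaining_words, [''] + delimiters[delimiter_idx + 1:]
--         else:
--           return [], []
-- ===== SOURCE B (Python) =====
-- import bisect
--
-- def get_remaining_words_and_delimiters_after_prefix(prefix, words, delimiters):
--     # cumulative-sum + bisect reformulation: build the running lengths of the
--     # interleaved token stream d0 w0 d1 w1 d2 ..., recording a boundary after
--     # each word and after each delimiter, then binary-search the first boundary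
--     # covering len(prefix) and decode the answer from its index.
--     if not delimiters:
--         return [], []
--     if not prefix:
--         return list(words), list(delimiters)
--     target = len(prefix)
--     cums = []
--     total = len(delimiters[0])
--     for w, d in zip(words, delimiters[1:]):
--         total += len(w)
--         cums.append(total)      # even slot: boundary right after word i
--         total += len(d)
--         cums.append(total)      # odd slot: boundary right after delimiter i+1
--     j = bisect.bisect_left(cums, target)
--     if j == len(cums):
--         return [], []
--     i = j // 2
--     rest = words[i + 1:]
--     if not rest:
--         return [], []
--     if j % 2 == 0:
--         return rest, delimiters[i + 1:]
--     return rest, [''] + delimiters[i + 2:]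
-- ===== Notes on version B (the rewrite author's own statement) =====
-- stated objective: alternative
-- what changed: Instead of A's single early-returning scan with a running index and per-iteration branch returns, B first builds the cumulative-length array of the interleaved delimiter/word token stream, binary-searches (bisect_left) the first boundary covering len(prefix), and decodes the result from the parity and half of that index.
-- outside the precondition, e.g. on get_remaining_words_and_delimiters_after_prefix('abcd', ['x'], ['-', '-']): A returns None, B returns ([], []); on get_remaining_words_and_delimiters_after_prefix('a', [], ['x', 'y']): A raises IndexError, B returns ([], [])
import Mathlib
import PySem

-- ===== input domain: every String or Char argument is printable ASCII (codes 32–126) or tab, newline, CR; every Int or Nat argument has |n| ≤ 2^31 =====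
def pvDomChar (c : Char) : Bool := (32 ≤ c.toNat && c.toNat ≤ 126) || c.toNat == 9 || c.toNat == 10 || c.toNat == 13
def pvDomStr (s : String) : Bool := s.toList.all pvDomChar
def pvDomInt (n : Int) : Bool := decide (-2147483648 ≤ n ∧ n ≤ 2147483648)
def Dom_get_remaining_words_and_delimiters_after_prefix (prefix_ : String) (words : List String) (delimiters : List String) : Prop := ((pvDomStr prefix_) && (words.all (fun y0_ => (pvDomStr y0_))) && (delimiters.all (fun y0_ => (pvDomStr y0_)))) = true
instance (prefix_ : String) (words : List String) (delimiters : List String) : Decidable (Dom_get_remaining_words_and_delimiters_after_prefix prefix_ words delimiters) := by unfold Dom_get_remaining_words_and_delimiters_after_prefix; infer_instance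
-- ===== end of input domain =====

-- B replaces A's early-returning scan by a cumulative-length array over the interleaved
-- token stream plus a bisect_left search; same results, objective: alternative algorithm.
-- Pre_ excludes exactly the inputs where Python A raises IndexError or falls through
-- returning None (no value of the declared pair type); ports return ([], []) there.

-- ===== PORT A =====
-- list(enumerate(delimiters)) : (index, value) pairs starting at k
def pvEnumFrom (k : Nat) : List String → List (Nat × String)
  | [] => []
  | x :: xs => (k, x) :: pvEnumFrom (k + 1) xs

-- the for-loop of A: state = remaining enumerate pairs + current_idx
def pvLoopA (target : Int) (words delimiters : List String) :
    List (Nat × String) → Int → List String × List String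
  | [], _ => ([], [])                         -- loop exhausted: Python returns None (outside Pre_)
  | (di, d) :: rest, cur =>
    let wi := di - 1
    match PySem.List.pyGet? words (wi : Int) with   -- word = words[word_idx]
    | none => ([], [])                        -- IndexError (outside Pre_)
    | some w =>
      let cur1 := cur + (w.length : Int)
      if target ≤ cur1 then                   -- current_idx >= len(prefix)
        if 0 < (PySem.List.slice words (some ((wi + 1 : Nat) : Int)) none).length then
          (PySem.List.slice words (some ((wi + 1 : Nat) : Int)) none,
           PySem.List.slice delimiters (some ((di : Nat) : Int)) none)
        else ([], [])
      else
        let cur2 := cur1 + (d.length : Int)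
        if target ≤ cur2 then
          if 0 < (PySem.List.slice words (some ((wi + 1 : Nat) : Int)) none).length then
            (PySem.List.slice words (some ((wi + 1 : Nat) : Int)) none,
             "" :: PySem.List.slice delimiters (some ((di + 1 : Nat) : Int)) none)
          else ([], [])
        else pvLoopA target words delimiters rest cur2

def get_remaining_words_and_delimiters_after_prefix (prefix_ : String) (words : List String) (delimiters : List String) : List String × List String :=
  match delimiters with
  | [] => ([], [])                            -- len(delimiters) == 0
  | d0 :: _ =>
    if prefix_.length = 0 then (words, delimiters)   -- words[:], delimiters[:]
    else
      pvLoopA (prefix_.length : Int) words delimiters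
        ((pvEnumFrom 0 delimiters).drop 1)    -- list(enumerate(delimiters))[1:]
        (d0.length : Int)                     -- current_idx = len(delimiters[0])

-- ===== PORT B =====
-- the cums-building loop of Source B: for w, d in zip(words, delimiters[1:])
def pvBuildCums : List (String × String) → Int → List Int
  | [], _ => []
  | (w, d) :: rest, total =>
    let t1 := total + (w.length : Int)
    let t2 := t1 + (d.length : Int)
    t1 :: t2 :: pvBuildCums rest t2

def get_remaining_words_and_delimiters_after_prefix_alt (prefix_ : String) (words : List String) (delimiters : List String) : List String × List String :=
  match delimiters with
  | [] => ([], [])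
  | d0 :: ds =>
    if prefix_.length = 0 then (words, delimiters)
    else
      let target : Int := prefix_.length
      let cums := pvBuildCums (words.zip ds) (d0.length : Int)
      let j := PySem.List.bisectLeft cums target      -- bisect.bisect_left(cums, target)
      if j = cums.length then ([], [])
      else
        let i := j / 2
        let rest := PySem.List.slice words (some ((i + 1 : Nat) : Int)) none
        if rest = [] then ([], [])
        else if j % 2 = 0 then
          (rest, PySem.List.slice delimiters (some ((i + 1 : Nat) : Int)) none)
        else
          (rest, "" :: PySem.List.slice delimiters (some ((i + 2 : Nat) : Int)) none)

-- ===== PRECONDITION & SPEC =====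
-- total length of d0 w0 d1 w1 … as far as the loop can consume it
def pvBound (words delimiters : List String) : Nat :=
  match delimiters with
  | [] => 0
  | d0 :: ds => d0.length + (words.zip ds).foldl (fun a p => a + p.1.length + p.2.length) 0

-- Pre_ excludes exactly the inputs on which Python A does NOT return a pair: with a nonempty
-- prefix it raises IndexError when words is empty (and delimiters has ≥ 2 entries), and it
-- falls off the loop returning None when delimiters has < 2 entries or len(prefix) exceeds
-- the reachable cumulative length pvBound.
def Pre_get_remaining_words_and_delimiters_after_prefix (prefix_ : String) (words : List String) (delimiters : List String) : Prop :=
  delimiters = [] ∨ prefix_.length = 0 ∨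
    (2 ≤ delimiters.length ∧ words ≠ [] ∧ prefix_.length ≤ pvBound words delimiters)
instance (prefix_ : String) (words : List String) (delimiters : List String) : Decidable (Pre_get_remaining_words_and_delimiters_after_prefix prefix_ words delimiters) := by unfold Pre_get_remaining_words_and_delimiters_after_prefix; infer_instance

def pvWitness_get_remaining_words_and_delimiters_after_prefix : String × List String × List String :=
  ("ab", ["x"], ["-", "-"])

def Spec_get_remaining_words_and_delimiters_after_prefix (prefix_ : String) (words : List String) (delimiters : List String) (out : List String × List String) : Prop := out = get_remaining_words_and_delimiters_after_prefix_alt prefix_ words delimiters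
instance (prefix_ : String) (words : List String) (delimiters : List String) (out : List String × List String) : Decidable (Spec_get_remaining_words_and_delimiters_after_prefix prefix_ words delimiters out) := by unfold Spec_get_remaining_words_and_delimiters_after_prefix; infer_instance

-- ===== CLAIM (what is proved, stated in full; the proofs are below) =====
def Claim_equal_get_remaining_words_and_delimiters_after_prefix : Prop := ∀ (prefix_ : String) (words : List String) (delimiters : List String), Dom_get_remaining_words_and_delimiters_after_prefix prefix_ words delimiters → Pre_get_remaining_words_and_delimiters_after_prefix prefix_ words delimiters → Spec_get_remaining_words_and_delimiters_after_prefix prefix_ words delimiters (get_remaining_words_and_delimiters_after_prefix prefix_ words delimiters)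

-- ===== LEMMAS AND PROOFS =====

-- common reference recursion both ports are reduced to: walks the remaining
-- (word, delimiter) suffixes with the running cumulative length cur
def pvGo (target : Int) : Int → List String → List String → List String × List String
  | _, _, [] => ([], [])
  | _, [], _ :: _ => ([], [])
  | cur, w :: ws', d :: ds' =>
    if target ≤ cur + (w.length : Int) then
      (if ws' = [] then ([], []) else (ws', d :: ds'))
    else if target ≤ cur + (w.length : Int) + (d.length : Int) then
      (if ws' = [] then ([], []) else (ws', "" :: ds'))
    else pvGo target (cur + (w.length : Int) + (d.length : Int)) ws' ds'

-- B's tail after the search, generalised over the base token-pair index i0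
def pvDecode (target : Int) (words delimiters : List String) (i0 : Nat) (cums : List Int) : List String × List String :=
  let j := cums.findIdx (fun c => decide (target ≤ c))
  if j = cums.length then ([], [])
  else
    let i := i0 + j / 2
    let rest := words.drop (i + 1)
    if rest = [] then ([], [])
    else if j % 2 = 0 then (rest, delimiters.drop (i + 1))
    else (rest, "" :: delimiters.drop (i + 2))

lemma pvBuildCums_sorted (ps : List (String × String)) : ∀ (cur : Int),
    List.Pairwise (· ≤ ·) (pvBuildCums ps cur) ∧ ∀ x ∈ pvBuildCums ps cur, cur ≤ x := by
  induction ps with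
  | nil => intro cur; simp [pvBuildCums]
  | cons p rest ih =>
    intro cur
    obtain ⟨w, d⟩ := p
    obtain ⟨ih1, ih2⟩ := ih (cur + (w.length : Int) + (d.length : Int))
    refine ⟨?_, ?_⟩
    · simp only [pvBuildCums, List.pairwise_cons]
      refine ⟨?_, ?_, ih1⟩
      · intro x hx
        rcases List.mem_cons.mp hx with rfl | hx
        · omega
        · have := ih2 x hx; omega
      · intro x hx
        have := ih2 x hx; omega
    · intro x hx
      simp only [pvBuildCums, List.mem_cons] at hx
      rcases hx with hx | hx | hx
      · omega
      · omega
      · have := ih2 x hx; omega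

lemma pvBisect_eq_findIdx (cums : List Int) (t : Int)
    (hs : List.Pairwise (· ≤ ·) cums) :
    PySem.List.bisectLeft cums t = cums.findIdx (fun c => decide (t ≤ c)) := by
  obtain ⟨hle, hlt, hge⟩ := PySem.List.bisectLeft_spec cums t hs
  set b := PySem.List.bisectLeft cums t with hb
  rcases lt_or_eq_of_le hle with hblt | hbeq
  · symm
    rw [List.findIdx_eq hblt]
    refine ⟨by simpa using hge b hblt le_rfl, ?_⟩
    intro j hj
    have := hlt j (hj.trans hblt) hj
    simp only [decide_eq_false_iff_not]
    omega
  · have : cums.findIdx (fun c => decide (t ≤ c)) = cums.length := by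
      rw [List.findIdx_eq_length]
      intro x hx
      obtain ⟨j, hj, rfl⟩ := List.mem_iff_getElem.mp hx
      have := hlt j hj (by omega)
      simp only [decide_eq_false_iff_not]
      omega
    omega

lemma pvA_eq_go (target : Int) (words delims : List String) :
    ∀ (ds : List String) (i : Nat) (cur : Int), delims.drop (i + 1) = ds →
      pvLoopA target words delims (pvEnumFrom (i + 1) ds) cur = pvGo target cur (words.drop i) ds := by
  intro ds
  induction ds with
  | nil =>
    intro i cur _
    cases h : words.drop i with
    | nil => simp [pvEnumFrom, pvLoopA, pvGo]
    | cons w ws' => simp [pvEnumFrom, pvLoopA, pvGo]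
  | cons d ds' ih =>
    intro i cur hd
    have hd' : delims.drop (i + 2) = ds' := by
      have : delims.drop (i + 2) = (delims.drop (i + 1)).drop 1 := by
        rw [List.drop_drop]
      rw [this, hd]; rfl
    simp only [pvEnumFrom, pvLoopA]
    have hwi : i + 1 - 1 = i := by omega
    rw [hwi]
    rw [PySem.List.pyGet?_natCast]
    cases hw : words[i]? with
    | none =>
      have hlen : words.length ≤ i := by
        simpa using List.getElem?_eq_none_iff.mp hw
      have : words.drop i = [] := List.drop_eq_nil_of_le hlen
      rw [this]
      simp [pvGo]
    | some w =>
      obtain ⟨hilt, hwe⟩ := List.getElem?_eq_some_iff.mp hw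
      have hwd : words.drop i = w :: words.drop (i + 1) := by
        rw [List.drop_eq_getElem_cons hilt, hwe]
      rw [hwd]
      simp only [pvGo]
      rw [PySem.List.slice_from_natCast, PySem.List.slice_from_natCast,
          PySem.List.slice_from_natCast]
      rw [hd, hd']
      by_cases h1 : target ≤ cur + (w.length : Int)
      · simp only [if_pos h1]
        cases hws : words.drop (i + 1) with
        | nil => simp
        | cons a l => simp
      · simp only [if_neg h1]
        by_cases h2 : target ≤ cur + (w.length : Int) + (d.length : Int)
        · simp only [if_pos h2]
          cases hws : words.drop (i + 1) with
          | nil => simp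
          | cons a l => simp
        · simp only [if_neg h2]
          exact ih (i + 1) (cur + (w.length : Int) + (d.length : Int)) hd'

lemma pvB_eq_go (target : Int) (words delims : List String) :
    ∀ (ws ds : List String) (i : Nat) (cur : Int),
      words.drop i = ws → delims.drop (i + 1) = ds →
      pvDecode target words delims i (pvBuildCums (ws.zip ds) cur) = pvGo target cur ws ds := by
  intro ws
  induction ws with
  | nil =>
    intro ds i cur _ _
    cases ds with
    | nil => simp [pvDecode, pvBuildCums, pvGo]
    | cons d ds' => simp [pvDecode, pvBuildCums, pvGo]
  | cons w ws' ih =>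
    intro ds i cur hw hd
    cases ds with
    | nil => simp [pvDecode, pvBuildCums, pvGo]
    | cons d ds' =>
      have hw' : words.drop (i + 1) = ws' := by
        have : words.drop (i + 1) = (words.drop i).drop 1 := by rw [List.drop_drop]
        rw [this, hw]; rfl
      have hd' : delims.drop (i + 2) = ds' := by
        have : delims.drop (i + 2) = (delims.drop (i + 1)).drop 1 := by rw [List.drop_drop]
        rw [this, hd]; rfl
      simp only [List.zip_cons_cons, pvBuildCums]
      by_cases h1 : target ≤ cur + (w.length : Int)
      · simp only [pvDecode, List.findIdx_cons, h1, decide_true, cond_true, List.length_cons]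
        rw [if_neg (by omega)]
        simp only [Nat.zero_div, Nat.add_zero]
        rw [hw', hd]
        simp only [if_true, pvGo, if_pos h1]
      · by_cases h2 : target ≤ cur + (w.length : Int) + (d.length : Int)
        · simp only [pvDecode, List.findIdx_cons, h1, h2, decide_true, decide_false,
            cond_true, cond_false, List.length_cons]
          rw [if_neg (by omega)]
          have e1 : i + (0 + 1) / 2 + 1 = i + 1 := by omega
          have e2 : i + (0 + 1) / 2 + 2 = i + 2 := by omega
          rw [e1, e2, hw', hd', if_neg (show ¬ ((0 + 1) % 2 = 0) by omega)]
          simp only [pvGo, if_neg h1, if_pos h2]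
        · -- neither boundary reached on this pair: both sides step to the next pair
          have hgo : pvGo target cur (w :: ws') (d :: ds')
              = pvGo target (cur + (w.length : Int) + (d.length : Int)) ws' ds' := by
            simp only [pvGo, if_neg h1, if_neg h2]
          rw [hgo,
            ← ih ds' (i + 1) (cur + (w.length : Int) + (d.length : Int)) hw' hd']
          simp only [pvDecode, List.findIdx_cons, h1, h2, decide_false, cond_false,
            List.length_cons]
          set j := (pvBuildCums (ws'.zip ds') (cur + (w.length : Int) + (d.length : Int))).findIdx
            (fun c => decide (target ≤ c)) with hj
          set L := (pvBuildCums (ws'.zip ds') (cur + (w.length : Int) + (d.length : Int))).length with hL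
          by_cases hjl : j = L
          · rw [if_pos (by omega), if_pos hjl]
          · rw [if_neg (by omega), if_neg hjl]
            have hdiv : i + (j + 1 + 1) / 2 = i + 1 + j / 2 := by omega
            have hmod : (j + 1 + 1) % 2 = j % 2 := by omega
            rw [hdiv, hmod]

lemma pvBalt_eq_decode (prefix_ : String) (words : List String) (d0 : String) (ds : List String)
    (hp : ¬ prefix_.length = 0) :
    get_remaining_words_and_delimiters_after_prefix_alt prefix_ words (d0 :: ds)
      = pvDecode (prefix_.length : Int) words (d0 :: ds) 0
          (pvBuildCums (words.zip ds) ((d0.length : Nat) : Int)) := by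
  simp only [get_remaining_words_and_delimiters_after_prefix_alt, if_neg hp, pvDecode]
  rw [pvBisect_eq_findIdx _ _ (pvBuildCums_sorted (words.zip ds) ((d0.length : Nat) : Int)).1]
  set j := (pvBuildCums (words.zip ds) ((d0.length : Nat) : Int)).findIdx
    (fun c => decide ((prefix_.length : Int) ≤ c)) with hj
  by_cases hjl : j = (pvBuildCums (words.zip ds) ((d0.length : Nat) : Int)).length
  · simp [hjl]
  · simp only [if_neg hjl]
    rw [PySem.List.slice_from_natCast, PySem.List.slice_from_natCast,
        PySem.List.slice_from_natCast]
    simp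

-- ===== VERDICT (by name: the statement is the Claim_ definition above) =====
theorem get_remaining_words_and_delimiters_after_prefix_spec : Claim_equal_get_remaining_words_and_delimiters_after_prefix := by
  intro prefix_ words delimiters _ _
  unfold Spec_get_remaining_words_and_delimiters_after_prefix
  cases delimiters with
  | nil => rfl
  | cons d0 ds =>
    by_cases hp : prefix_.length = 0
    · simp [get_remaining_words_and_delimiters_after_prefix,
        get_remaining_words_and_delimiters_after_prefix_alt, hp]
    · rw [pvBalt_eq_decode prefix_ words d0 ds hp]
      have hB := pvB_eq_go (prefix_.length : Int) words (d0 :: ds) words ds 0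
        ((d0.length : Nat) : Int) (by simp) (by simp)
      rw [hB]
      have hA := pvA_eq_go (prefix_.length : Int) words (d0 :: ds) ds 0
        ((d0.length : Nat) : Int) (by simp)
      simp only [get_remaining_words_and_delimiters_after_prefix, if_neg hp]
      have henum : (pvEnumFrom 0 (d0 :: ds)).drop 1 = pvEnumFrom 1 ds := by
        simp [pvEnumFrom]
      rw [henum]
      simpa using hA
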